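-- pv_equiv track=rewrite | github.com/noelhuang/bioinformatics | Week 3/SSAHAv2 backup.py | construct_hash_table
-- ===== SOURCE A (Python) =====
-- def construct_hash_table(sequences, k):
--     hash_table = {}
--     for i in range(0, len(sequences)):
--         for j in range(0, len(sequences[i]) - k + 1, k):
--             ktuple_in_sequence = sequences[i][j:j + k]
--             if ktuple_in_sequence in hash_table:
--                 hash_table[ktuple_in_sequence].append((i, j))
--             else:
--                 hash_table[ktuple_in_sequence] = [(i, j)]
--     hash_table = {key: value for key, value in sorted(hash_table.items())}
--     return hash_table
-- ===== SOURCE B (Python) =====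
-- def construct_hash_table(sequences, k):
--     # Materialize every (ktuple, position) pair in one comprehension,
--     # sort the flat list stably by ktuple, then cut it into maximal runs
--     # of equal ktuples: each run becomes one table entry, positions in
--     # scan order (stable sort keeps them ascending).
--     pairs = [(seq[j:j + k], (i, j))
--              for i, seq in enumerate(sequences)
--              for j in range(0, len(seq) - k + 1, k)]
--     pairs.sort(key=lambda q: q[0])
--     table = {}
--     start = 0
--     n = len(pairs)
--     while start < n:
--         key, first_pos = pairs[start]
--         stop = start + 1
--         while stop < n and pairs[stop][0] == key:
--             stop += 1
--         table[key] = [first_pos] + [q[1] for q in pairs[start + 1:stop]]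
--         start = stop
--     return table
-- ===== Notes on version B (the rewrite author's own statement) =====
-- stated objective: alternative
-- what changed: A builds the dict during the scan with a membership test per k-tuple and then sorts the keys; B materializes the flat list of all (ktuple, position) pairs in one comprehension, stable-sorts it by ktuple, and cuts the sorted list into maximal runs of equal keys, each run becoming one table entry.
import Mathlib
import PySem

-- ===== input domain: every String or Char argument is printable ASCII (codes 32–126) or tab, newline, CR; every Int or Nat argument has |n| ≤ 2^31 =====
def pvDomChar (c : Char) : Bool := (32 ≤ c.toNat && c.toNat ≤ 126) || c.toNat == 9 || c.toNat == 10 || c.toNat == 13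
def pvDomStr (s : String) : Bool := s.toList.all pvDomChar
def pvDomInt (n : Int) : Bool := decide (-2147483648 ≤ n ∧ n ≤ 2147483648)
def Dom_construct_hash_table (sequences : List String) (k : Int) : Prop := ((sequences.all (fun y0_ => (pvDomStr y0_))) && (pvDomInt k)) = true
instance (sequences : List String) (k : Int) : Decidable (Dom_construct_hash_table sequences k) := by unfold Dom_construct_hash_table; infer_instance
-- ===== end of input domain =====

-- B replaces A's scan-with-dict-membership by: materialize all (ktuple, position)
-- pairs, stable-sort them by ktuple, and cut the sorted list into maximal runs
-- (objective: alternative decomposition, same exact result).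

-- ===== PORT A =====
-- dict keys are unique, so Python's sorted(hash_table.items()) orders by the key
-- alone (the tie-breaking components are never compared); the rebuilt dict's
-- items are exactly that sorted list (exact).
def construct_hash_table (sequences : List String) (k : Int) : List (String × List (Int × Int)) :=
  let hash_table : PySem.Dict String (List (Int × Int)) :=
    (PySem.List.pyRange 0 (PySem.List.len sequences) 1).foldl
      (fun d i =>
        (PySem.List.pyRange 0 (PySem.Str.len (PySem.List.pyGetD sequences i "") - k + 1) k).foldl
          (fun d j =>
            let ktuple_in_sequence :=
              PySem.Str.slice (PySem.List.pyGetD sequences i "") (some j) (some (j + k))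
            if d.contains ktuple_in_sequence then
              d.modify ktuple_in_sequence [] (fun v => v ++ [(i, j)])
            else
              d.insert ktuple_in_sequence [(i, j)])
          d)
      PySem.Dict.empty
  PySem.List.sorted hash_table.items (fun it => it.1) false

-- ===== PORT B =====
-- the flat comprehension of all (ktuple, (i, j)) pairs
def pvPairs (sequences : List String) (k : Int) : List (String × (Int × Int)) :=
  (PySem.List.enumerate sequences).flatMap (fun p =>
    (PySem.List.pyRange 0 (PySem.Str.len p.2 - k + 1) k).map
      (fun j => (PySem.Str.slice p.2 (some j) (some (j + k)), (p.1, j))))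

-- Source B's while loop scans the maximal run of equal keys starting at the current
-- position, emits one entry for it and continues right after the run; transcribed
-- as the structural recursion taking the run off the front (same runs, same order).
def pvGroup : List (String × (Int × Int)) → List (String × List (Int × Int))
  | [] => []
  | q :: rest =>
      (q.1, q.2 :: (rest.takeWhile (fun r => r.1 == q.1)).map (fun r => r.2)) ::
        pvGroup (rest.dropWhile (fun r => r.1 == q.1))
  termination_by l => l.length
  decreasing_by simpa using Nat.lt_succ_of_le (List.length_dropWhile_le _ _)

def construct_hash_table_alt (sequences : List String) (k : Int) : List (String × List (Int × Int)) :=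
  pvGroup (PySem.List.sorted (pvPairs sequences k) (fun q => q.1) false)

-- ===== PRECONDITION & SPEC =====
-- Pre_ excludes only k = 0 with a nonempty sequence list, where Python's
-- range(0, len(seq) - k + 1, k) raises ValueError (zero step) in A and in B alike.
def Pre_construct_hash_table (sequences : List String) (k : Int) : Prop :=
  k ≠ 0 ∨ sequences = []
instance (sequences : List String) (k : Int) : Decidable (Pre_construct_hash_table sequences k) := by
  unfold Pre_construct_hash_table; infer_instance

def pvWitness_construct_hash_table : List String × Int := (["ACGTAC", "GTA"], 3)

def Spec_construct_hash_table (sequences : List String) (k : Int) (out : List (String × List (Int × Int))) : Prop := out = construct_hash_table_alt sequences k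
instance (sequences : List String) (k : Int) (out : List (String × List (Int × Int))) : Decidable (Spec_construct_hash_table sequences k out) := by unfold Spec_construct_hash_table; infer_instance

-- ===== CLAIM (what is proved, stated in full; the proofs are below) =====
def Claim_equal_construct_hash_table : Prop := ∀ (sequences : List String) (k : Int), Dom_construct_hash_table sequences k → Pre_construct_hash_table sequences k → Spec_construct_hash_table sequences k (construct_hash_table sequences k)

-- ===== LEMMAS AND PROOFS =====

-- the canonical dict built by the modify-append loop over a flat pair list
def pvFoldD (Q : List (String × (Int × Int))) : PySem.Dict String (List (Int × Int)) :=
  Q.foldl (fun d q => d.modify q.1 [] (fun v => v ++ [q.2])) PySem.Dict.empty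

-- A's branch on membership is the unconditional modify-append
theorem pv_step_eq (d : PySem.Dict String (List (Int × Int))) (kt : String) (pos : Int × Int) :
    (if d.contains kt then d.modify kt [] (fun v => v ++ [pos]) else d.insert kt [pos])
      = d.modify kt [] (fun v => v ++ [pos]) := by
  by_cases h : d.contains kt = true
  · simp [h]
  · have hf : d.contains kt = false := by simpa using h
    rw [if_neg (by simp [hf]), PySem.Dict.modify, PySem.Dict.getD_of_not_contains]
    · simp
    · exact hf

-- A's nested loop builds pvFoldD of the flat pair list
theorem pv_A_eq_fold (sequences : List String) (k : Int) :
    construct_hash_table sequences k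
      = PySem.List.sorted (pvFoldD (pvPairs sequences k)).items (fun it => it.1) false := by
  simp only [construct_hash_table, pvFoldD, pvPairs, List.foldl_flatMap,
    PySem.List.enumerate_eq_map_pyRange sequences "", List.foldl_map, pv_step_eq]

-- items of the fold: first-occurrence keys, each with its filtered positions
theorem pv_items_fold (Q : List (String × (Int × Int))) :
    (pvFoldD Q).items
      = (PySem.Set.ofList (Q.map (fun q => q.1))).map
          (fun κ => (κ, (Q.filter (fun q => q.1 == κ)).map (fun q => q.2))) := by
  have hk : (pvFoldD Q).keys = PySem.Set.ofList (Q.map (fun q => q.1)) := by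
    have := PySem.Dict.keys_foldl_modify_key (ν := List (Int × Int)) Q (fun q => q.1) []
      (fun _ q => (fun v => v ++ [q.2])) PySem.Dict.empty
    simpa [pvFoldD, PySem.Dict.keys_empty, PySem.Set.update, PySem.Set.ofList_eq_foldl] using this
  have hnd : (pvFoldD Q).keys.Nodup := by
    have := PySem.Dict.nodup_keys_foldl_modify_key (ν := List (Int × Int)) Q (fun q => q.1) []
      (fun _ q => (fun v => v ++ [q.2])) PySem.Dict.empty (by simp [PySem.Dict.keys_empty])
    simpa [pvFoldD] using this
  rw [PySem.Dict.items_eq_map_keys _ hnd [], hk]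
  refine List.map_congr_left (fun κ _ => ?_)
  have hg : (pvFoldD Q).getD κ [] = (Q.filter (fun q => q.1 == κ)).map (fun q => q.2) := by
    have := PySem.Dict.getD_foldl_modify_append Q (PySem.Dict.empty) κ
    simpa [pvFoldD, PySem.Dict.getD_empty] using this
  rw [hg]

-- sorting such an items list by key = sorting the key set
theorem pv_sorted_items (L : List String) (g : String → List (Int × Int)) :
    PySem.List.sorted ((PySem.Set.ofList L).map (fun κ => (κ, g κ))) (fun it => it.1) false
      = (PySem.List.sorted (PySem.Set.ofList L) (fun x => x) false).map (fun κ => (κ, g κ)) := by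
  apply PySem.List.sorted_eq_of_perm_of_pairwise_lt
  · exact (PySem.List.sorted_perm _ _ _).map _
  · exact List.pairwise_map.mpr (by simpa using PySem.List.sorted_ofList_pairwise_lt L)

-- stability, one insertion: the new pair lands after every pair of equal key
theorem pv_filter_insertBy (x : String × (Int × Int)) (ys : List (String × (Int × Int))) (κ : String)
    (h : ys.Pairwise (fun a b => a.1 ≤ b.1)) :
    (PySem.List.insertBy (fun a b => decide (a.1 < b.1)) x ys).filter (fun q => q.1 == κ)
      = ys.filter (fun q => q.1 == κ) ++ (if x.1 == κ then [x] else []) := by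
  induction ys with
  | nil => simp [PySem.List.insertBy]; split <;> simp_all
  | cons y t ih =>
    rw [PySem.List.insertBy]
    by_cases hb : x.1 < y.1
    · rw [if_pos (by simpa using hb)]
      by_cases hx : x.1 = κ
      · have hnil : ∀ q ∈ y :: t, ¬(q.1 == κ) := by
          intro q hq
          have : y.1 ≤ q.1 := by
            rcases List.mem_cons.mp hq with rfl | hq
            · exact le_refl _
            · exact (List.pairwise_cons.mp h).1 q hq
          have : κ < q.1 := lt_of_lt_of_le (hx ▸ hb) this
          simp [ne_of_gt this]
        have h1 : (y :: t).filter (fun q => q.1 == κ) = [] :=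
          List.filter_eq_nil_iff.mpr (by simpa using hnil)
        simp [h1, hx]
      · simp [hx, List.filter_cons]
    · rw [if_neg (by simpa using hb)]
      have ih' := ih (List.pairwise_cons.mp h).2
      simp only [List.filter_cons, ih']
      split <;> simp

-- stability: the stable sort preserves the relative order of equal keys
theorem pv_sorted_filter (Q : List (String × (Int × Int))) (κ : String) :
    (PySem.List.sorted Q (fun q => q.1) false).filter (fun q => q.1 == κ)
      = Q.filter (fun q => q.1 == κ) := by
  induction Q using List.reverseRecOn with
  | nil => simp [PySem.List.sorted]
  | append_singleton Q x ih =>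
    have hs : PySem.List.sorted (Q ++ [x]) (fun q => q.1) false
        = PySem.List.insertBy (fun a b => decide (a.1 < b.1)) x
            (PySem.List.sorted Q (fun q => q.1) false) := by
      rw [PySem.List.sorted_eq_foldl_insertBy, PySem.List.sorted_eq_foldl_insertBy,
        List.foldl_append]
      rfl
    rw [hs, pv_filter_insertBy _ _ _ (PySem.List.sorted_pairwise _ _), ih,
      List.filter_append]
    by_cases hx : x.1 = κ <;> simp [hx]

-- dedup is a sublist (first occurrences in order)
theorem pv_foldl_add_sublist {α : Type} [BEq α] (xs acc : List α) :
    (xs.foldl PySem.Set.add acc).Sublist (acc ++ xs) := by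
  induction xs generalizing acc with
  | nil => simp
  | cons x xs ih =>
    refine (ih (PySem.Set.add acc x)).trans ?_
    by_cases h : PySem.Set.contains acc x
    · simp only [PySem.Set.add, h, if_pos]
      exact (List.sublist_cons_self x xs).append_left acc
    · simp only [PySem.Set.add, h, if_neg, Bool.false_eq_true, not_false_eq_true]
      simp

theorem pv_dedup_sublist {α : Type} [BEq α] (xs : List α) :
    (PySem.List.dedup xs).Sublist xs := by
  simpa [PySem.List.dedup_eq_ofList, PySem.Set.ofList_eq_foldl]
    using pv_foldl_add_sublist xs []

-- dedup of the sorted key column = sorted key set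
theorem pv_dedup_sorted_keys (Q : List (String × (Int × Int))) :
    PySem.List.dedup ((PySem.List.sorted Q (fun q => q.1) false).map (fun q => q.1))
      = PySem.List.sorted (PySem.Set.ofList (Q.map (fun q => q.1))) (fun x => x) false := by
  symm
  apply PySem.List.sorted_eq_of_perm_of_pairwise_lt
  · apply List.perm_of_nodup_nodup_toFinset_eq (PySem.List.nodup_dedup _) (PySem.Set.nodup_ofList _)
    ext x
    simp only [List.mem_toFinset, PySem.List.mem_dedup, PySem.Set.mem_ofList]
    exact ((PySem.List.sorted_perm Q (fun q => q.1) false).map (fun q => q.1)).mem_iff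
  · have hle : ((PySem.List.sorted Q (fun q => q.1) false).map (fun q => q.1)).Pairwise (· ≤ ·) :=
      PySem.List.sorted_map_key_pairwise Q (fun q => q.1)
    have hsub := pv_dedup_sublist ((PySem.List.sorted Q (fun q => q.1) false).map (fun q => q.1))
    have h1 := hle.sublist hsub
    have h2 : (PySem.List.dedup ((PySem.List.sorted Q (fun q => q.1) false).map (fun q => q.1))).Pairwise (· ≠ ·) :=
      PySem.List.nodup_dedup _
    exact (h1.and h2).imp (fun ⟨hle', hne⟩ => lt_of_le_of_ne hle' hne)

-- dedup of a run: leading key, a block of its repeats, then keys ≠ it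
theorem pv_dedup_run (κ : String) (M N : List String)
    (hM : ∀ a ∈ M, a = κ) (hN : κ ∉ N) :
    PySem.List.dedup (κ :: (M ++ N)) = κ :: PySem.List.dedup N := by
  induction M with
  | nil =>
    have : PySem.Set.ofList (κ :: N) = PySem.Set.update [κ] N := by
      simp [PySem.Set.ofList_eq_foldl, PySem.Set.update, PySem.Set.add, PySem.Set.contains]
    simp only [PySem.List.dedup_eq_ofList, List.nil_append, this,
      PySem.Set.update_eq_append_filter]
    have : ∀ y ∈ PySem.Set.ofList N, !(PySem.Set.contains [κ] y) := by
      intro y hy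
      have : y ≠ κ := fun h => hN (h ▸ (PySem.Set.mem_ofList N y).mp hy)
      simp [PySem.Set.contains, this]
    rw [List.filter_eq_self.mpr this]
    rfl
  | cons a M ih =>
    have ha : a = κ := hM a (by simp)
    subst ha
    have step : PySem.Set.ofList (a :: ((a :: M) ++ N)) = PySem.Set.ofList (a :: (M ++ N)) := by
      simp [PySem.Set.ofList_eq_foldl, PySem.Set.add, PySem.Set.contains]
    simp only [PySem.List.dedup_eq_ofList] at *
    rw [step]
    exact ih (fun b hb => hM b (by simp [hb]))

-- grouping a key-sorted list = one entry per distinct key, positions filtered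
theorem pv_group_eq (S : List (String × (Int × Int)))
    (h : S.Pairwise (fun a b => a.1 ≤ b.1)) :
    pvGroup S
      = (PySem.List.dedup (S.map (fun q => q.1))).map
          (fun κ => (κ, (S.filter (fun q => q.1 == κ)).map (fun q => q.2))) := by
  induction S using pvGroup.induct with
  | case1 => simp [pvGroup, PySem.List.dedup_eq_ofList, PySem.Set.ofList_eq_foldl]
  | case2 q rest ih =>
    set same := rest.takeWhile (fun r => r.1 == q.1) with hsame_def
    set other := rest.dropWhile (fun r => r.1 == q.1) with hother_def
    have hsplit : same ++ other = rest := List.takeWhile_append_dropWhile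
    have hpr : rest.Pairwise (fun a b => a.1 ≤ b.1) := (List.pairwise_cons.mp h).2
    have hhead : ∀ r ∈ rest, q.1 ≤ r.1 := (List.pairwise_cons.mp h).1
    have hsameK : ∀ r ∈ same, r.1 = q.1 := by
      intro r hr
      simpa using List.mem_takeWhile_imp hr
    have hpo : other.Pairwise (fun a b => a.1 ≤ b.1) := hpr.sublist (List.dropWhile_sublist _)
    have hotherK : ∀ r ∈ other, r.1 ≠ q.1 := by
      intro r hr hrq
      -- head of other fails the predicate, yet its key would then have to be q.1
      cases ho : other with
      | nil => simp [ho] at hr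
      | cons y t =>
        have hy : ¬(y.1 == q.1) := by
          have := List.head?_dropWhile_not (fun r => r.1 == q.1) rest
          rw [← hother_def, ho] at this
          simpa using this
        have hyq : q.1 ≤ y.1 := hhead y (by
          have : y ∈ other := by simp [ho]
          exact (List.dropWhile_sublist _).mem this)
        have hyr : y.1 ≤ r.1 := by
          rw [ho] at hr
          rcases List.mem_cons.mp hr with rfl | hr'
          · exact le_refl _
          · exact (List.pairwise_cons.mp (ho ▸ hpo)).1 r hr'
        have : y.1 = q.1 := le_antisymm (hrq ▸ hyr) hyq
        simp [this] at hy
    -- key column decomposition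
    have hmap : (q :: rest).map (fun r => r.1)
        = q.1 :: (same.map (fun r => r.1) ++ other.map (fun r => r.1)) := by
      rw [List.map_cons, ← hsplit, List.map_append]
    have hded : PySem.List.dedup ((q :: rest).map (fun r => r.1))
        = q.1 :: PySem.List.dedup (other.map (fun r => r.1)) := by
      rw [hmap]
      exact pv_dedup_run q.1 _ _
        (by intro a ha; rcases List.mem_map.mp ha with ⟨r, hr, rfl⟩; exact hsameK r hr)
        (by intro hmem; rcases List.mem_map.mp hmem with ⟨r, hr, hrk⟩; exact hotherK r hr hrk)
    rw [pvGroup, hded, List.map_cons]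
    congr 1
    · -- the head entry
      have hfq : (q :: rest).filter (fun r => r.1 == q.1) = q :: same := by
        rw [List.filter_cons_of_pos (by simp), ← hsplit, List.filter_append,
          List.filter_eq_self.mpr (by intro r hr; simpa using hsameK r hr),
          List.filter_eq_nil_iff.mpr (by intro r hr; simpa using hotherK r hr)]
        simp
      rw [hfq]
      simp only [List.map_cons]
      rw [← hsame_def]
    · -- the grouped tail
      rw [ih hpo]
      refine List.map_congr_left (fun κ hκ => ?_)
      have hκo : κ ∈ other.map (fun r => r.1) := (PySem.List.mem_dedup _ _).mp hκ
      rcases List.mem_map.mp hκo with ⟨r0, hr0, rfl⟩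
      have hκq : r0.1 ≠ q.1 := hotherK r0 hr0
      have hfo : (q :: rest).filter (fun r => r.1 == r0.1) = other.filter (fun r => r.1 == r0.1) := by
        rw [List.filter_cons_of_neg (by simpa using fun h => hκq h.symm), ← hsplit,
          List.filter_append, List.filter_eq_nil_iff.mpr
            (by intro r hr; simpa using fun h => hκq (h.symm.trans (hsameK r hr)))]
        simp
      rw [hfo]

-- ===== VERDICT (by name: the statement is the Claim_ definition above) =====
theorem construct_hash_table_spec : Claim_equal_construct_hash_table := by
  intro sequences k _ _
  unfold Spec_construct_hash_table construct_hash_table_alt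
  rw [pv_A_eq_fold, pv_items_fold, pv_sorted_items,
    pv_group_eq _ (PySem.List.sorted_pairwise _ _), pv_dedup_sorted_keys]
  simp only [pv_sorted_filter]
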